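-- pv_equiv track=rewrite | github.com/madao2588/my_third_app | server/app/engine/parser.py | _derive_list_title
-- ===== SOURCE A (Python) =====
-- def _derive_list_title(entries: list[dict[str, str]]) -> str:
--     preferred_fields = ("title", "topic", "name", "headline")
--     for field in preferred_fields:
--         for entry in entries:
--             value = entry.get(field)
--             if value:
--                 return value
--
--     first_entry = entries[0]
--     return next(iter(first_entry.values()), "Collected Items")
-- ===== SOURCE B (Python) =====
-- def _derive_list_title(entries: list[dict[str, str]]) -> str:
--     preferred_fields = ("title", "topic", "name", "headline")
--     found = {}
--     for entry in entries:
--         for field, value in entry.items():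
--             if field in preferred_fields and value and field not in found:
--                 found[field] = value
--     for field in preferred_fields:
--         if field in found:
--             return found[field]
--     first_entry = entries[0]
--     return next(iter(first_entry.values()), "Collected Items")
-- ===== Notes on version B (the rewrite author's own statement) =====
-- stated objective: alternative
-- what changed: Replaces A's field-major nested scan (one pass over all entries per preferred field) with a single entry-major pass that records the first non-empty value per preferred field in a dict, then resolves priority afterwards.
import Mathlib
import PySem

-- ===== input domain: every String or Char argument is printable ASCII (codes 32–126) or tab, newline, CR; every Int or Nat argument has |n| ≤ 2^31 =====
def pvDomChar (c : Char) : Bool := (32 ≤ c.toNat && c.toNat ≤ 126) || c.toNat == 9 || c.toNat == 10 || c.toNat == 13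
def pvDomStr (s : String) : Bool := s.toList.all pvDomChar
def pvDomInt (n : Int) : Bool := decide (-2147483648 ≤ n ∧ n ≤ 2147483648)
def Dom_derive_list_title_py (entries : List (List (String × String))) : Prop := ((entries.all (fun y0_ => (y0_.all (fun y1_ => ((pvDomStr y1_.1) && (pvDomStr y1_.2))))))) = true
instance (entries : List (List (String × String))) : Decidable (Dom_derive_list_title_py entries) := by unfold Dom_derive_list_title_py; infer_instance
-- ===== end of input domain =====

-- ===== PORT A =====
-- entry.get(field) truthiness test: first match in the assoc list, kept only if non-empty
def pvTruthyGet (e : List (String × String)) (f : String) : Option String :=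
  match e.find? (fun p => p.1 == f) with
  | some p => if p.2 = "" then none else some p.2
  | none => none

-- fallback shared by both Pythons verbatim: entries[0]; next(iter(first.values()), "Collected Items")
def pvFallback (entries : List (List (String × String))) : String :=
  match PySem.List.pyGet? entries 0 with
  | some first => ((first.map Prod.snd).head?).getD "Collected Items"
  | none => ""   -- IndexError in Python: excluded by Pre_derive_list_title_py

def derive_list_title_py (entries : List (List (String × String))) : String :=
  match ["title", "topic", "name", "headline"].findSome?
      (fun f => entries.findSome? (fun e => pvTruthyGet e f)) with
  | some v => v
  | none => pvFallback entries

-- ===== PORT B =====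
def pvFields : List String := ["title", "topic", "name", "headline"]

def pvStep (found : PySem.Dict String String) (p : String × String) : PySem.Dict String String :=
  if pvFields.contains p.1 && p.2 != "" && !(found.contains p.1)
  then found.insert p.1 p.2 else found

def pvFound (entries : List (List (String × String))) : PySem.Dict String String :=
  entries.foldl (fun found entry => entry.foldl pvStep found) PySem.Dict.empty

def derive_list_title_py_alt (entries : List (List (String × String))) : String :=
  match pvFields.findSome? (fun f => (pvFound entries).get? f) with
  | some v => v
  | none => pvFallback entries

-- ===== PRECONDITION & SPEC =====
-- Pre_ excludes the empty list, on which A raises IndexError, and association lists with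
-- duplicate keys inside an entry, which cannot arise from a Python dict.
def Pre_derive_list_title_py (entries : List (List (String × String))) : Prop :=
  entries ≠ [] ∧ ∀ e ∈ entries, (e.map Prod.fst).Nodup
instance (entries : List (List (String × String))) : Decidable (Pre_derive_list_title_py entries) := by
  unfold Pre_derive_list_title_py; infer_instance
def pvWitness_derive_list_title_py : (List (List (String × String))) := [[("title", "T")]]

def Spec_derive_list_title_py (entries : List (List (String × String))) (out : String) : Prop := out = derive_list_title_py_alt entries
instance (entries : List (List (String × String))) (out : String) : Decidable (Spec_derive_list_title_py entries out) := by unfold Spec_derive_list_title_py; infer_instance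

-- ===== CLAIM (what is proved, stated in full; the proofs are below) =====
def Claim_equal_derive_list_title_py : Prop := ∀ (entries : List (List (String × String))), Dom_derive_list_title_py entries → Pre_derive_list_title_py entries → Spec_derive_list_title_py entries (derive_list_title_py entries)

-- ===== LEMMAS AND PROOFS =====

theorem pvTruthyGet_of_not_mem {e : List (String × String)} {f : String}
    (h : f ∉ e.map Prod.fst) : pvTruthyGet e f = none := by
  unfold pvTruthyGet
  have : e.find? (fun p => p.1 == f) = none := by
    rw [List.find?_eq_none]
    intro p hp hbe
    exact h (List.mem_map.mpr ⟨p, hp, by simpa using hbe⟩)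
  simp [this]

-- one entry processed by the inner loop: first non-empty value per preferred field, kept only if absent
theorem pvStep_foldl (e : List (String × String)) (found : PySem.Dict String String)
    (hnd : (e.map Prod.fst).Nodup) (f : String) :
    (e.foldl pvStep found).get? f
      = (found.get? f).or (if f ∈ pvFields then pvTruthyGet e f else none) := by
  induction e generalizing found with
  | nil => simp [pvTruthyGet]
  | cons p rest ih =>
    simp only [List.map_cons, List.nodup_cons] at hnd
    simp only [List.foldl_cons]
    rw [ih _ hnd.2]
    by_cases hk : p.1 = f
    · subst hk
      rw [pvTruthyGet_of_not_mem hnd.1]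
      have htr : pvTruthyGet (p :: rest) p.1 = if p.2 = "" then none else some p.2 := by
        unfold pvTruthyGet; simp
      rw [htr]
      by_cases hfld : p.1 ∈ pvFields
      · by_cases hv : p.2 = ""
        · simp [pvStep, hfld, hv]
        · cases hg : found.get? p.1 with
          | none =>
            have hc : found.contains p.1 = false :=
              (PySem.Dict.get?_eq_none_iff_contains found p.1).mp hg
            simp [pvStep, hfld, hv, hc, PySem.Dict.get?_insert_self]
          | some w =>
            have hc : found.contains p.1 = true := by
              rw [PySem.Dict.contains_eq_isSome_get?, hg]; rfl
            simp [pvStep, hfld, hv, hc, hg]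
      · simp [pvStep, hfld]
    · have hstep : (pvStep found p).get? f = found.get? f := by
        unfold pvStep
        split
        · exact PySem.Dict.get?_insert_of_ne found p.2 (fun h => hk h.symm)
        · rfl
      have htr : pvTruthyGet (p :: rest) f = pvTruthyGet rest f := by
        unfold pvTruthyGet
        simp [hk]
      rw [hstep, htr]

-- the whole single pass: per preferred field, the first non-empty value in entry order
theorem pvFound_foldl (entries : List (List (String × String)))
    (found : PySem.Dict String String)
    (hnd : ∀ e ∈ entries, (e.map Prod.fst).Nodup) (f : String) :
    (entries.foldl (fun found entry => entry.foldl pvStep found) found).get? f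
      = (found.get? f).or
          (if f ∈ pvFields then entries.findSome? (fun e => pvTruthyGet e f) else none) := by
  induction entries generalizing found with
  | nil => simp
  | cons e rest ih =>
    simp only [List.foldl_cons]
    rw [ih _ (fun x hx => hnd x (List.mem_cons_of_mem _ hx)),
        pvStep_foldl e found (hnd e (by simp)) f]
    rw [List.findSome?_cons]
    by_cases hfld : f ∈ pvFields
    · simp only [hfld, if_true]
      cases pvTruthyGet e f <;> simp
    · simp [hfld]

theorem pvFound_get (entries : List (List (String × String)))
    (hnd : ∀ e ∈ entries, (e.map Prod.fst).Nodup) (f : String) (hf : f ∈ pvFields) :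
    (pvFound entries).get? f = entries.findSome? (fun e => pvTruthyGet e f) := by
  unfold pvFound
  rw [pvFound_foldl entries PySem.Dict.empty hnd f]
  simp [hf]

-- ===== VERDICT (by name: the statement is the Claim_ definition above) =====
theorem derive_list_title_py_spec : Claim_equal_derive_list_title_py := by
  intro entries _ hpre
  unfold Spec_derive_list_title_py derive_list_title_py derive_list_title_py_alt
  have h : ∀ f : String, f ∈ pvFields →
      (pvFound entries).get? f = entries.findSome? (fun e => pvTruthyGet e f) :=
    fun f hf => pvFound_get entries hpre.2 f hf
  have h1 := h "title" (by decide)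
  have h2 := h "topic" (by decide)
  have h3 := h "name" (by decide)
  have h4 := h "headline" (by decide)
  simp only [pvFields, List.findSome?_cons, List.findSome?_nil, h1, h2, h3, h4]
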